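-- pv_equiv track=rewrite | github.com/calvinxhk/homework | 魏博言/文本处理/文本压缩/huff_compress.py | get_word_weight
-- ===== SOURCE A (Python) =====
-- def get_word_weight(content,txt):
--     begin = 0
--     end = 1
--     size = len(txt)
--     weight_dict ={key:0 for key in content }
--     while end <= size:
--         if txt[begin:end].isalpha():
--             end +=1
--         else:
--             if not txt[begin:end -1]:
--                 weight_dict[txt[begin]] +=1
--                 begin += 1
--                 end  += 1
--             else:
--                 weight_dict[txt[begin:end-1]] +=1
--                 begin = end -1
--     return weight_dict
-- ===== SOURCE B (Python) =====
-- def get_word_weight(content, txt):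
--     # one linear pass: grow the current alphabetic word; on a non-alphabetic
--     # character flush the pending word (if any) and count the character itself
--     weight_dict = dict.fromkeys(content, 0)
--     word = ""
--     for ch in txt:
--         if ch.isalpha():
--             word += ch
--         else:
--             if word:
--                 weight_dict[word] += 1
--                 word = ""
--             weight_dict[ch] += 1
--     return weight_dict
-- ===== Notes on version B (the rewrite author's own statement) =====
-- stated objective: faster
-- what changed: A re-slices txt[begin:end] and re-runs isalpha on the whole growing slice at every step (O(n^2) character work); B makes a single pass over the characters, growing the current word buffer and flushing it at each non-alphabetic delimiter, testing only one character per step (O(n) for bounded word length).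
import Mathlib
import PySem

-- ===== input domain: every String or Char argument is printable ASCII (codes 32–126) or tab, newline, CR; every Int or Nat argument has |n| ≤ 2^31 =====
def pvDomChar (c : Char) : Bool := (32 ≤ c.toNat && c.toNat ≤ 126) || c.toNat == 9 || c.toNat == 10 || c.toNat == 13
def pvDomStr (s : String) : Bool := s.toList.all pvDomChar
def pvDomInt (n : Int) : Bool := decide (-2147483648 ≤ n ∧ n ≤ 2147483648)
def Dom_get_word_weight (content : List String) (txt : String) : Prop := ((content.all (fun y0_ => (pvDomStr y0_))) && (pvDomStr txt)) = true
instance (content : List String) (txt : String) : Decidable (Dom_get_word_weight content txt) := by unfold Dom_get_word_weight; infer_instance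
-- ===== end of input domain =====

-- B replaces A's O(n^2) re-slicing-and-retesting loop by a single linear pass that
-- grows a word buffer and flushes it at each non-alphabetic delimiter (return value only).

-- shared helper = Python's `weight_dict[k] += 1` (both programs contain this line).
-- On a missing key Python raises KeyError — excluded by Pre_; the port no-ops there.
def pvIncr (d : PySem.Dict String Int) (k : String) : PySem.Dict String Int :=
  match d.get? k with
  | some v => d.insert k (v + 1)
  | none => d

-- shared helper = `{key: 0 for key in content}` / `dict.fromkeys(content, 0)`
def pvInit (content : List String) : PySem.Dict String Int :=
  content.foldl (fun d k => d.insert k (0 : Int)) PySem.Dict.empty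

-- ===== PORT A =====
-- A's while-loop; Python's `end` is carried as e = end - 1 (end ≥ 1 throughout the loop).
def pvLoopA (cs : List Char) (wd : PySem.Dict String Int) (b e : Nat) :
    PySem.Dict String Int :=
  if h : e + 1 ≤ cs.length then                                     -- while end <= size
    if PySem.Chars.strIsalpha (PySem.List.slice cs (some (b : Int)) (some ((e : Int) + 1))) then
      pvLoopA cs wd b (e + 1)                                       -- end += 1
    else if hw : PySem.List.slice cs (some (b : Int)) (some (e : Int)) = [] then
      match PySem.List.pyGet? cs (b : Int) with                     -- txt[begin]
      | none => wd                                                  -- unreachable IndexError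
      | some c => pvLoopA cs (pvIncr wd (String.mk [c])) (b + 1) (e + 1)
    else
      pvLoopA cs
        (pvIncr wd (String.mk (PySem.List.slice cs (some (b : Int)) (some (e : Int)))))
        e e                                                         -- begin = end - 1
  else wd
termination_by (cs.length - e, e + 1 - b)
decreasing_by
  · exact Prod.Lex.left _ _ (by omega)
  · exact Prod.Lex.left _ _ (by omega)
  · apply Prod.Lex.right'
    · omega
    · have h1 : (PySem.List.slice cs (some (b : Int)) (some (e : Int))).length
          = PySem.List.clampIdx cs.length (e : Int) - PySem.List.clampIdx cs.length (b : Int) :=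
        PySem.List.length_slice cs _ _
      have h2 : PySem.List.clampIdx cs.length (e : Int) = min e cs.length :=
        PySem.List.clampIdx_natCast _ _
      have h3 : PySem.List.clampIdx cs.length (b : Int) = min b cs.length :=
        PySem.List.clampIdx_natCast _ _
      have h4 : (PySem.List.slice cs (some (b : Int)) (some (e : Int))).length ≠ 0 := by
        simpa [List.length_eq_zero_iff] using hw
      omega

def get_word_weight (content : List String) (txt : String) : List (String × Int) :=
  (pvLoopA txt.toList (pvInit content) 0 0).items

-- ===== PORT B =====
-- one step of B's for-loop over the characters; state = (weight_dict, word)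
def pvStepB (st : PySem.Dict String Int × List Char) (c : Char) :
    PySem.Dict String Int × List Char :=
  if PySem.Chars.isalpha c then (st.1, st.2 ++ [c])
  else
    let wd1 := if st.2 = [] then st.1 else pvIncr st.1 (String.mk st.2)
    (pvIncr wd1 (String.mk [c]), [])

def get_word_weight_alt (content : List String) (txt : String) : List (String × Int) :=
  (txt.toList.foldl pvStepB (pvInit content, [])).1.items

-- ===== PRECONDITION & SPEC =====
-- the counted tokens of txt: each non-alphabetic character, and each alphabetic run
-- terminated by a non-alphabetic character (a trailing alphabetic run is never counted)
def pvTokens (word : List Char) : List Char → List String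
  | [] => []
  | c :: rest =>
    if PySem.Chars.isalpha c then pvTokens (word ++ [c]) rest
    else (if word = [] then [] else [String.mk word]) ++ String.mk [c] :: pvTokens [] rest

-- Pre_: every counted token of txt is a key of the initial dict, i.e. appears in
-- content — on any other input Python's `weight_dict[...] += 1` raises KeyError.
def Pre_get_word_weight (content : List String) (txt : String) : Prop :=
  ∀ t ∈ pvTokens [] txt.toList, t ∈ content
instance (content : List String) (txt : String) : Decidable (Pre_get_word_weight content txt) := by
  unfold Pre_get_word_weight; infer_instance

def pvWitness_get_word_weight : List String × String := (["ab", " ", "!"], "ab! a")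

def Spec_get_word_weight (content : List String) (txt : String) (out : List (String × Int)) : Prop := out = get_word_weight_alt content txt
instance (content : List String) (txt : String) (out : List (String × Int)) : Decidable (Spec_get_word_weight content txt out) := by unfold Spec_get_word_weight; infer_instance

-- ===== CLAIM (what is proved, stated in full; the proofs are below) =====
def Claim_equal_get_word_weight : Prop := ∀ (content : List String) (txt : String), Dom_get_word_weight content txt → Pre_get_word_weight content txt → Spec_get_word_weight content txt (get_word_weight content txt)

-- ===== LEMMAS AND PROOFS =====

theorem pv_slice_succ (cs : List Char) (b e : Nat) :
    PySem.List.slice cs (some (b : Int)) (some ((e : Int) + 1))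
      = (cs.drop b).take (e + 1 - b) := by
  have h : ((e : Int) + 1) = ((e + 1 : Nat) : Int) := by push_cast; ring
  rw [h, PySem.List.slice_natCast]

theorem pv_word_succ (cs : List Char) (b e : Nat) (hbe : b ≤ e) (he : e < cs.length) :
    (cs.drop b).take (e + 1 - b) = (cs.drop b).take (e - b) ++ [cs[e]] := by
  have h1 : e + 1 - b = (e - b) + 1 := by omega
  rw [h1, List.take_succ]
  have h2 : (cs.drop b)[e - b]? = some cs[e] := by
    rw [List.getElem?_drop]
    have h3 : b + (e - b) = e := by omega
    rw [h3, List.getElem?_eq_getElem he]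
  simp [h2]

theorem pv_loop_eq (cs : List Char) (wd : PySem.Dict String Int) (b e : Nat) :
    b ≤ e → e ≤ cs.length →
    (∀ c ∈ (cs.drop b).take (e - b), PySem.Chars.isalpha c = true) →
    pvLoopA cs wd b e = ((cs.drop e).foldl pvStepB (wd, (cs.drop b).take (e - b))).1 := by
  induction wd, b, e using pvLoopA.induct cs with
  | case1 wd b e h halpha ih =>
    intro hbe he hal
    have helt : e < cs.length := by omega
    have h2 := halpha
    rw [pv_slice_succ, pv_word_succ cs b e hbe helt] at h2
    simp only [PySem.Chars.strIsalpha, Bool.and_eq_true, List.all_append, List.all_cons,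
      List.all_nil, Bool.and_true] at h2
    have halc : ∀ c ∈ (cs.drop b).take (e - b) ++ [cs[e]], PySem.Chars.isalpha c = true := by
      intro c hc
      rcases List.mem_append.mp hc with hm | hm
      · exact List.all_eq_true.mp h2.2.1 _ hm
      · have : c = cs[e] := by simpa using hm
        subst this; exact h2.2.2
    have hca : PySem.Chars.isalpha cs[e] = true := halc _ (by simp)
    rw [pvLoopA, dif_pos h, if_pos halpha]
    rw [ih (by omega) h (by rw [pv_word_succ cs b e hbe helt]; exact halc)]
    rw [List.drop_eq_getElem_cons helt, List.foldl_cons]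
    have hstep : pvStepB (wd, (cs.drop b).take (e - b)) cs[e]
        = (wd, (cs.drop b).take (e - b) ++ [cs[e]]) := by
      simp [pvStepB, hca]
    rw [hstep, pv_word_succ cs b e hbe helt]
  | case2 wd b e h halpha hw hget =>
    intro hbe he hal
    have helt : b < cs.length := by omega
    rw [PySem.List.pyGet?_natCast, List.getElem?_eq_getElem helt] at hget
    exact absurd hget (by simp)
  | case3 wd b e h halpha hw c hget ih =>
    intro hbe he hal
    have helt : e < cs.length := by omega
    have hwS := hw
    rw [PySem.List.slice_natCast] at hwS
    have hbeq : b = e := by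
      rcases List.take_eq_nil_iff.mp hwS with h0 | h0
      · omega
      · have hl := congrArg List.length h0
        simp at hl; omega
    subst hbeq
    have hc : c = cs[b] := by
      rw [PySem.List.pyGet?_natCast, List.getElem?_eq_getElem helt] at hget
      exact (Option.some_inj.mp hget).symm
    subst hc
    have hna : PySem.Chars.isalpha cs[b] = false := by
      by_contra hcc
      apply halpha
      rw [pv_slice_succ, pv_word_succ cs b b hbe helt]
      simp only [Nat.sub_self, List.take_zero, List.nil_append]
      simp [PySem.Chars.strIsalpha] at hcc ⊢
      exact hcc
    rw [pvLoopA, dif_pos h, if_neg halpha, dif_pos hw, hget]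
    show pvLoopA cs (pvIncr wd (String.mk [cs[b]])) (b + 1) (b + 1) = _
    rw [ih (Nat.le_refl _) h (by simp)]
    rw [List.drop_eq_getElem_cons helt, List.foldl_cons]
    simp [pvStepB, hna]
  | case4 wd b e h halpha hw ih =>
    intro hbe he hal
    have helt : e < cs.length := by omega
    have hwS := hw
    rw [PySem.List.slice_natCast] at hwS
    have hwall : ((cs.drop b).take (e - b)).all PySem.Chars.isalpha = true :=
      List.all_eq_true.mpr (fun c hc => hal c hc)
    have hna : PySem.Chars.isalpha cs[e] = false := by
      by_contra hcc
      have hca : PySem.Chars.isalpha cs[e] = true := by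
        cases hx : PySem.Chars.isalpha cs[e] with
        | false => exact absurd hx hcc
        | true => rfl
      apply halpha
      rw [pv_slice_succ, pv_word_succ cs b e hbe helt]
      simp [PySem.Chars.strIsalpha, List.all_append, hca, hwall]
    rw [pvLoopA, dif_pos h, if_neg halpha, dif_neg hw]
    simp only [PySem.List.slice_natCast] at ih ⊢
    rw [ih (Nat.le_refl _) (by omega) (by simp)]
    rw [List.drop_eq_getElem_cons helt, List.foldl_cons, List.foldl_cons]
    simp [pvStepB, hna, hwS]
  | case5 wd b e h =>
    intro hbe he hal
    have heq : e = cs.length := by omega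
    subst heq
    rw [pvLoopA, dif_neg h]
    simp

-- ===== VERDICT (by name: the statement is the Claim_ definition above) =====
theorem get_word_weight_spec : Claim_equal_get_word_weight := by
  intro content txt _ _
  unfold Spec_get_word_weight get_word_weight get_word_weight_alt
  rw [pv_loop_eq txt.toList (pvInit content) 0 0 (Nat.le_refl 0) (Nat.zero_le _) (by simp)]
  simp
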